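-- pv_equiv track=rewrite | github.com/Snehal-Deshmukh0604/ApexaIQ | Week3/Codes/4_oracle.py | extract_version_number
-- ===== SOURCE A (Python) =====
-- def extract_version_number(text):
--     """
--     Extract version number from text.
--
--     Args:
--         text (str): Text containing version information
--
--     Returns:
--         str: Version number or None
--     """
--     # Look for version patterns like 9.2, 8.8, 7.9, etc.
--     words = text.split()
--     for word in words:
--         # Check for patterns like 9.2, 8.8, 7.9
--         if '.' in word and any(char.isdigit() for char in word):
--             version_chars = []
--             for char in word:
--                 if char.isdigit() or char == '.':
--                     version_chars.append(char)
--                 elif version_chars: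
--                     break
--
--             version_str = ''.join(version_chars).strip('.')
--             if version_str:
--                 return version_str
--
--         # Check for patterns like OL9, OL8, OL7
--         if word.lower().startswith('ol') and len(word) > 2:
--             rest = word[2:]
--             if rest and rest[0].isdigit():
--                 version_chars = []
--                 for char in rest:
--                     if char.isdigit() or char == '.':
--                         version_chars.append(char)
--                     elif version_chars:
--                         break
--
--                 version_str = ''.join(version_chars).strip('.')
--                 if version_str:
--                     return version_str
--
--     return None
-- ===== SOURCE B (Python) =====
-- def _first_run(s):
--     """First maximal run of digit/'.' characters in s, via index scanning + slice."""
--     n = len(s)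
--     i = 0
--     while i < n and not (s[i].isdigit() or s[i] == '.'):
--         i += 1
--     j = i
--     while j < n and (s[j].isdigit() or s[j] == '.'):
--         j += 1
--     return s[i:j]
--
--
-- def extract_version_number(text):
--     for word in text.split():
--         if '.' in word and any(c.isdigit() for c in word):
--             version = _first_run(word).strip('.')
--             if version:
--                 return version
--         if word.lower().startswith('ol') and len(word) > 2:
--             rest = word[2:]
--             if rest[0].isdigit():
--                 return _first_run(rest).strip('.')
--     return None
-- ===== Notes on version B (the rewrite author's own statement) =====
-- stated objective: simpler
-- what changed: A's per-word accumulate-with-break character loops are replaced by a shared _first_run helper that locates the first digit/dot run with a two-phase index scan and one slice, and the OL-branch's provably redundant emptiness checks are dropped.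
import Mathlib
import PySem

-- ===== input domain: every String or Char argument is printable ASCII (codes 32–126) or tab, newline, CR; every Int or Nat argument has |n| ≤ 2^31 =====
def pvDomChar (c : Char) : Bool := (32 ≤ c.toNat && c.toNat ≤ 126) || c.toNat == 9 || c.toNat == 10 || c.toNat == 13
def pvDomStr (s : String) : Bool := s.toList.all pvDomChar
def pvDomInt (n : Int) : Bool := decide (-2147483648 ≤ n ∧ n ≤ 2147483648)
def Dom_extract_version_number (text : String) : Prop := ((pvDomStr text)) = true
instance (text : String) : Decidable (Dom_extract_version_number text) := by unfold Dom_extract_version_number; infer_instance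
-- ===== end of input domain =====

-- B replaces A's per-word accumulate-with-break character loops by a two-phase index
-- scan (skip, then extend) plus one slice, and drops the provably redundant emptiness
-- checks of the OL-branch; objective: simpler, same behaviour.

-- ===== PORT A =====
-- the inner `for char in word: … elif version_chars: break` loop of A
def pvAScan (acc : List Char) : List Char → List Char
  | [] => acc
  | c :: rest =>
    if PySem.Chars.isdigit c || c == '.' then pvAScan (acc ++ [c]) rest
    else if acc.isEmpty then pvAScan acc rest else acc

-- A's loop body for one word (branch 1 first; an early return is `some`)
def pvAWord (w : List Char) : Option (List Char) :=
  let b1 : Option (List Char) :=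
    if PySem.Chars.isIn ['.'] w && w.any PySem.Chars.isdigit then
      let v := PySem.Chars.stripChars (pvAScan [] w) ['.']
      if v.isEmpty then none else some v
    else none
  match b1 with
  | some v => some v
  | none =>
    if PySem.Chars.startswith (PySem.Chars.lower w) ['o', 'l'] && decide (2 < w.length) then
      match w.drop 2 with      -- rest = word[2:]; `if rest and rest[0].isdigit():`
      | [] => none
      | c :: t =>
        if PySem.Chars.isdigit c then
          let v := PySem.Chars.stripChars (pvAScan [] (c :: t)) ['.']
          if v.isEmpty then none else some v
        else none
    else none

def pvALoop : List (List Char) → Option (List Char)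
  | [] => none
  | w :: ws =>
    match pvAWord w with
    | some v => some v
    | none => pvALoop ws

def extract_version_number (text : String) : Option String :=
  (pvALoop (PySem.Chars.split₀ text.toList)).map String.ofList

-- ===== PORT B =====
def pvBPred (c : Char) : Bool := PySem.Chars.isdigit c || c == '.'

-- first `while` of _first_run: advance i past non-matching chars
def pvBSkip (s : List Char) (i : Nat) : Nat :=
  if h : i < s.length then
    if !pvBPred s[i] then pvBSkip s (i + 1) else i
  else i
termination_by s.length - i

-- second `while` of _first_run: advance j over matching chars
def pvBTake (s : List Char) (i : Nat) : Nat :=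
  if h : i < s.length then
    if pvBPred s[i] then pvBTake s (i + 1) else i
  else i
termination_by s.length - i

def pvFirstRun (s : List Char) : List Char :=
  let i := pvBSkip s 0
  let j := pvBTake s i
  PySem.List.slice s (some (i : Int)) (some (j : Int))   -- s[i:j]

def pvBWord (w : List Char) : Option (List Char) :=
  let b1 : Option (List Char) :=
    if PySem.Chars.isIn ['.'] w && w.any PySem.Chars.isdigit then
      let v := PySem.Chars.stripChars (pvFirstRun w) ['.']
      if v.isEmpty then none else some v
    else none
  match b1 with
  | some v => some v
  | none =>
    if PySem.Chars.startswith (PySem.Chars.lower w) ['o', 'l'] && decide (2 < w.length) then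
      match w.drop 2 with      -- rest = word[2:]; nonempty since len(word) > 2
      | [] => none
      | c :: t =>
        if PySem.Chars.isdigit c then
          some (PySem.Chars.stripChars (pvFirstRun (c :: t)) ['.'])
        else none
    else none

def pvBLoop : List (List Char) → Option (List Char)
  | [] => none
  | w :: ws =>
    match pvBWord w with
    | some v => some v
    | none => pvBLoop ws

def extract_version_number_alt (text : String) : Option String :=
  (pvBLoop (PySem.Chars.split₀ text.toList)).map String.ofList

-- ===== PRECONDITION & SPEC =====
def Spec_extract_version_number (text : String) (out : Option String) : Prop := out = extract_version_number_alt text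
instance (text : String) (out : Option String) : Decidable (Spec_extract_version_number text out) := by unfold Spec_extract_version_number; infer_instance

-- ===== CLAIM (what is proved, stated in full; the proofs are below) =====
def Claim_equal_extract_version_number : Prop := ∀ (text : String), Dom_extract_version_number text → Spec_extract_version_number text (extract_version_number text)

-- ===== LEMMAS AND PROOFS =====

theorem pvAScan_ne_nil (s : List Char) (acc : List Char) (h : acc ≠ []) :
    pvAScan acc s = acc ++ s.takeWhile pvBPred := by
  induction s generalizing acc with
  | nil => simp [pvAScan]
  | cons c rest ih =>
    have h' : acc.isEmpty = false := by simpa [List.isEmpty_eq_false_iff] using h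
    by_cases hc : (PySem.Chars.isdigit c || c == '.') = true
    · simp [pvAScan, pvBPred, hc, ih (acc ++ [c]) (by simp)]
    · simp [pvAScan, pvBPred, hc, h']

theorem pvAScan_nil (s : List Char) :
    pvAScan [] s = (s.dropWhile (fun c => !pvBPred c)).takeWhile pvBPred := by
  induction s with
  | nil => simp [pvAScan]
  | cons c rest ih =>
    by_cases hc : (PySem.Chars.isdigit c || c == '.') = true
    · rw [List.dropWhile_cons, if_neg (by simp [pvBPred, hc]), List.takeWhile_cons,
        if_pos (by simpa [pvBPred] using hc)]
      simp [pvAScan, hc, pvAScan_ne_nil rest [c] (by simp)]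
    · rw [List.dropWhile_cons, if_pos (by simpa [pvBPred] using hc)]
      simp [pvAScan, hc, ih]

theorem pvBSkip_drop (s : List Char) (i : Nat) :
    s.drop (pvBSkip s i) = (s.drop i).dropWhile (fun c => !pvBPred c) := by
  unfold pvBSkip
  split
  · rename_i h
    by_cases hp : (!pvBPred s[i]) = true
    · rw [if_pos hp, pvBSkip_drop s (i + 1), List.drop_eq_getElem_cons h, List.dropWhile_cons]
      simp [hp]
    · rw [if_neg hp, List.drop_eq_getElem_cons h, List.dropWhile_cons]
      simp only [Bool.not_eq_true'] at hp
      simp [hp]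
  · rename_i h
    rw [List.drop_of_length_le (by omega)]
    simp
termination_by s.length - i

theorem pvBTake_ge (s : List Char) (i : Nat) : i ≤ pvBTake s i := by
  unfold pvBTake
  split
  · split
    · have := pvBTake_ge s (i + 1)
      omega
    · omega
  · omega
termination_by s.length - i

theorem pvBTake_take (s : List Char) (i : Nat) :
    (s.drop i).take (pvBTake s i - i) = (s.drop i).takeWhile pvBPred := by
  unfold pvBTake
  split
  · rename_i h
    by_cases hp : pvBPred s[i] = true
    · rw [if_pos hp]
      have hge := pvBTake_ge s (i + 1)
      have hstep : pvBTake s (i + 1) - i = (pvBTake s (i + 1) - (i + 1)) + 1 := by omega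
      rw [List.drop_eq_getElem_cons h, hstep, List.take_succ_cons, List.takeWhile_cons,
        pvBTake_take s (i + 1)]
      simp [hp]
    · rw [if_neg hp, List.drop_eq_getElem_cons h, List.takeWhile_cons]
      simp [hp]
  · rename_i h
    rw [List.drop_of_length_le (by omega)]
    simp
termination_by s.length - i

theorem pvFirstRun_eq_pvAScan (s : List Char) :
    pvFirstRun s = pvAScan [] s := by
  rw [pvAScan_nil]
  simp only [pvFirstRun, PySem.List.slice_natCast]
  rw [pvBTake_take s (pvBSkip s 0), pvBSkip_drop s 0, List.drop_zero]

theorem pvStripChars_digit_head_ne_nil (c : Char) (t : List Char)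
    (hc : PySem.Chars.isdigit c = true) :
    (PySem.Chars.stripChars (c :: t) ['.']).isEmpty = false := by
  have hne : c ≠ '.' := by
    intro he
    rw [he] at hc
    exact absurd hc (by decide)
  have hcd : (['.'] : List Char).contains c = false := by
    simpa using hne
  simp only [PySem.Chars.stripChars]
  rw [List.isEmpty_eq_false_iff, ne_eq, List.reverse_eq_nil_iff, List.dropWhile_eq_nil_iff]
  intro hall
  have hmem : c ∈ (List.dropWhile (fun x => List.contains ['.'] x) (c :: t)).reverse := by
    rw [List.dropWhile_cons, if_neg (by simpa using hne)]
    simp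
  have := hall c hmem
  rw [hcd] at this
  exact absurd this (by simp)

theorem pvAWord_eq_pvBWord (w : List Char) : pvAWord w = pvBWord w := by
  simp only [pvAWord, pvBWord, pvFirstRun_eq_pvAScan]
  cases hb1 : (if PySem.Chars.isIn ['.'] w && w.any PySem.Chars.isdigit then
      (if (PySem.Chars.stripChars (pvAScan [] w) ['.']).isEmpty then none
       else some (PySem.Chars.stripChars (pvAScan [] w) ['.']))
    else none) with
  | some v => rfl
  | none =>
    by_cases hg : (PySem.Chars.startswith (PySem.Chars.lower w) ['o', 'l'] && decide (2 < w.length)) = true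
    · simp only [if_pos hg]
      cases hdrop : w.drop 2 with
      | nil => rfl
      | cons c t =>
        by_cases hc : PySem.Chars.isdigit c = true
        · have hscan : pvAScan [] (c :: t) = c :: t.takeWhile pvBPred := by
            rw [pvAScan_nil, List.dropWhile_cons, if_neg (by simp [pvBPred, hc]),
              List.takeWhile_cons, if_pos (by simp [pvBPred, hc])]
          have hne' : PySem.Chars.stripChars (pvAScan [] (c :: t)) ['.'] ≠ [] := by
            rw [hscan]
            simpa [List.isEmpty_eq_false_iff] using
              pvStripChars_digit_head_ne_nil c (t.takeWhile pvBPred) hc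
          simp [hc, hne']
        · simp [hc]
    · simp [hg]

theorem pvALoop_eq_pvBLoop (ws : List (List Char)) : pvALoop ws = pvBLoop ws := by
  induction ws with
  | nil => rfl
  | cons w ws ih =>
    simp only [pvALoop, pvBLoop, pvAWord_eq_pvBWord, ih]

-- ===== VERDICT (by name: the statement is the Claim_ definition above) =====
theorem extract_version_number_spec : Claim_equal_extract_version_number := by
  intro text _
  unfold Spec_extract_version_number extract_version_number extract_version_number_alt
  rw [pvALoop_eq_pvBLoop]
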